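-- pv_equiv track=rewrite | github.com/efago/advent-of-code | 2021/day_9.py | get_largest_basins
-- ===== SOURCE A (Python) =====
-- from typing import List, Set, TextIO, Tuple
--
-- def get_basin_size(
--     row: int,
--     column: int,
--     row_limit: int,
--     col_limit: int,
--     visited: Set[Tuple[int, int]],
--     data: List[List[int]],
-- ) -> int:
--     basin_size = 1
--     visited.add((row, column))
--     digit = data[row][column]
--     condition = (
--         lambda r, c: data[r][c] > digit and data[r][c] < 9 and (r, c) not in visited
--     )
--     if row > 0 and condition(row - 1, column):
--         basin_size += get_basin_size(
--             row - 1, column, row_limit, col_limit, visited, data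
--         )
--     if row < row_limit and condition(row + 1, column):
--         basin_size += get_basin_size(
--             row + 1, column, row_limit, col_limit, visited, data
--         )
--     if column > 0 and condition(row, column - 1):
--         basin_size += get_basin_size(
--             row, column - 1, row_limit, col_limit, visited, data
--         )
--     if column < col_limit and condition(row, column + 1):
--         basin_size += get_basin_size(
--             row, column + 1, row_limit, col_limit, visited, data
--         )
--
--     return basin_size
--
-- def get_largest_basins(data: List[List[int]]) -> int:
--     rows = len(data)
--     columns = len(data[0])
--     basin_sizes = []
--
--     for row, digits in enumerate(data):
--         for column, digit in enumerate(digits):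
--             if digit < 9:
--                 basin_sizes.append(
--                     get_basin_size(row, column, rows - 1, columns - 1, set(), data)
--                 )
--
--     basin_sizes.sort(reverse=True)
--     return basin_sizes[0] * basin_sizes[1] * basin_sizes[2]
-- ===== SOURCE B (Python) =====
-- from typing import List
--
-- def get_largest_basins(data: List[List[int]]) -> int:
--     rows = len(data)
--     columns = len(data[0])
--     basin_sizes = []
--     for r0, digits in enumerate(data):
--         for c0, d0 in enumerate(digits):
--             if d0 < 9:
--                 # iterative flood fill with an explicit stack of (cell, parent value)
--                 visited = {(r0, c0)}
--                 size = 1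
--                 stack = []
--                 def push(r, c, v):
--                     # push in reverse so pop order is up, down, left, right
--                     if c < columns - 1:
--                         stack.append((r, c + 1, v))
--                     if c > 0:
--                         stack.append((r, c - 1, v))
--                     if r < rows - 1:
--                         stack.append((r + 1, c, v))
--                     if r > 0:
--                         stack.append((r - 1, c, v))
--                 push(r0, c0, d0)
--                 while stack:
--                     r, c, d = stack.pop()
--                     if (r, c) not in visited:
--                         v = data[r][c]
--                         if d < v < 9:
--                             visited.add((r, c))
--                             size += 1
--                             push(r, c, v)
--                 basin_sizes.append(size)
--     basin_sizes.sort(reverse=True)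
--     return basin_sizes[0] * basin_sizes[1] * basin_sizes[2]
-- ===== Notes on version B (the rewrite author's own statement) =====
-- stated objective: alternative
-- what changed: The recursive get_basin_size flood fill is replaced by an iterative worklist loop over an explicit stack of (cell, parent-value) tasks with visited checked at pop time; the top-level scan, sort(reverse=True) and product of the first three sizes are kept.
-- outside the precondition, e.g. on get_largest_basins([[9, 9, 9], [0, 0, 0], [9, 9, 9], [9]]): A returns 1, B returns 1
import Mathlib
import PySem

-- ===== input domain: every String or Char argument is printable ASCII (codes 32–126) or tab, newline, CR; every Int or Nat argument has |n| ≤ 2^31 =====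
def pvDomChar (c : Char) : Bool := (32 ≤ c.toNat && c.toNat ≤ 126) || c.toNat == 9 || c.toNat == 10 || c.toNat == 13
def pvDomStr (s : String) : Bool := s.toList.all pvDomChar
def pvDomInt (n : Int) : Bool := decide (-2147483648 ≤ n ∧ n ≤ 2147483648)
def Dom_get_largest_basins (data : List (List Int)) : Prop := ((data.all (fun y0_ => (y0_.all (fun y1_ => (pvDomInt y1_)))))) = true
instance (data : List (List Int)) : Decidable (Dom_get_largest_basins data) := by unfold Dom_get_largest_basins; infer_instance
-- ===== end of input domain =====

-- B replaces the recursive flood fill by an explicit-stack worklist loop (same top-level scan, sort and product); alternative decomposition, not claimed faster.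

-- ===== PORT A =====

-- data[r][c]; the default is unreachable on the admitted inputs (Pre_ keeps all accesses in range)
def pvCell (data : List (List Int)) (r c : Int) : Int :=
  PySem.List.pyGetD (PySem.List.pyGetD data r []) c 0

-- A's `condition` lambda, with d = the digit of the cell being expanded
def pvCond (data : List (List Int)) (d r c : Int) (V : PySem.Set (Int × Int)) : Bool :=
  decide (d < pvCell data r c) && decide (pvCell data r c < 9) && !(PySem.Set.contains V (r, c))

-- recursive get_basin_size; fuel only makes the recursion structural (never exhausted under Pre_, see pvDfs_some)
def pvDfs (data : List (List Int)) (rl cl : Int) :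
    Nat → Int → Int → PySem.Set (Int × Int) → Option (Int × PySem.Set (Int × Int))
  | 0, _, _, _ => none
  | f + 1, r, c, V =>
    let V0 := PySem.Set.add V (r, c)
    let digit := pvCell data r c
    match (if decide (0 < r) && pvCond data digit (r - 1) c V0 then
             pvDfs data rl cl f (r - 1) c V0 else some (0, V0)) with
    | none => none
    | some (s1, V1) =>
      match (if decide (r < rl) && pvCond data digit (r + 1) c V1 then
               pvDfs data rl cl f (r + 1) c V1 else some (0, V1)) with
      | none => none
      | some (s2, V2) =>
        match (if decide (0 < c) && pvCond data digit r (c - 1) V2 then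
                 pvDfs data rl cl f r (c - 1) V2 else some (0, V2)) with
        | none => none
        | some (s3, V3) =>
          match (if decide (c < cl) && pvCond data digit r (c + 1) V3 then
                   pvDfs data rl cl f r (c + 1) V3 else some (0, V3)) with
          | none => none
          | some (s4, V4) => some (1 + s1 + s2 + s3 + s4, V4)

def get_largest_basins (data : List (List Int)) : Int :=
  let rows : Int := data.length
  let columns : Int := (PySem.List.pyGetD data 0 []).length
  let fuel : Nat := (rows * columns).toNat + 2
  let basin_sizes : List Int :=
    (PySem.List.enumerate data 0).foldl (fun acc p =>
      (PySem.List.enumerate p.2 0).foldl (fun acc2 q =>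
        if q.2 < 9 then
          acc2 ++ [((pvDfs data (rows - 1) (columns - 1) fuel p.1 q.1 PySem.Set.empty).map Prod.fst).getD 0]
        else acc2) acc) []
  let sorted := PySem.List.sorted basin_sizes (fun x => x) true
  PySem.List.pyGetD sorted 0 0 * PySem.List.pyGetD sorted 1 0 * PySem.List.pyGetD sorted 2 0

-- ===== PORT B =====

-- data[r][c] for B; the default is unreachable on the admitted inputs
def pvCellB (data : List (List Int)) (r c : Int) : Int :=
  PySem.List.pyGetD (PySem.List.pyGetD data r []) c 0

-- B's push(): in-bounds neighbour tasks carrying the popped cell's value; head = top of stack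
def pvNbrs (rl cl r c v : Int) : List (Int × Int × Int) :=
  (if decide (0 < r) then [(r - 1, c, v)] else []) ++
  (if decide (r < rl) then [(r + 1, c, v)] else []) ++
  (if decide (0 < c) then [(r, c - 1, v)] else []) ++
  (if decide (c < cl) then [(r, c + 1, v)] else [])

-- B's while loop; fuel only makes the loop structural (never exhausted under Pre_)
def pvRun (data : List (List Int)) (rl cl : Int) :
    Nat → List (Int × Int × Int) → PySem.Set (Int × Int) → Int → Option Int
  | 0, _, _, _ => none
  | _ + 1, [], _, k => some k
  | f + 1, (r, c, d) :: ts, V, k =>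
    if !(PySem.Set.contains V (r, c)) && (decide (d < pvCellB data r c) && decide (pvCellB data r c < 9)) then
      pvRun data rl cl f (pvNbrs rl cl r c (pvCellB data r c) ++ ts) (PySem.Set.add V (r, c)) (k + 1)
    else
      pvRun data rl cl f ts V k

def get_largest_basins_alt (data : List (List Int)) : Int :=
  let rows : Int := data.length
  let columns : Int := (PySem.List.pyGetD data 0 []).length
  let fuel : Nat := 8 ^ ((rows * columns).toNat + 2) + 1
  let basin_sizes : List Int :=
    (PySem.List.enumerate data 0).foldl (fun acc p =>
      (PySem.List.enumerate p.2 0).foldl (fun acc2 q =>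
        if q.2 < 9 then
          acc2 ++ [(pvRun data (rows - 1) (columns - 1) fuel
                      (pvNbrs (rows - 1) (columns - 1) p.1 q.1 q.2)
                      (PySem.Set.ofList [(p.1, q.1)]) 1).getD 0]
        else acc2) acc) []
  let sorted := PySem.List.sorted basin_sizes (fun x => x) true
  PySem.List.pyGetD sorted 0 0 * PySem.List.pyGetD sorted 1 0 * PySem.List.pyGetD sorted 2 0

-- ===== PRECONDITION & SPEC =====
-- Pre_ excludes (a) inputs where A raises IndexError: empty data, or fewer than three cells < 9
-- (fewer than three basins); and (b) ragged grids, on which A sizes every row by row 0 and its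
-- success is accidental (most such grids raise; see the cite in claim.json for one that returns).
def Pre_get_largest_basins (data : List (List Int)) : Prop :=
  data ≠ [] ∧ (∀ row ∈ data, row.length = (data.headD []).length) ∧
  3 ≤ ((data.flatMap (fun row => row.filter (fun d => d < 9))).length)
instance (data : List (List Int)) : Decidable (Pre_get_largest_basins data) := by
  unfold Pre_get_largest_basins; infer_instance

def pvWitness_get_largest_basins : List (List Int) := [[0, 9, 0], [9, 9, 9], [0, 9, 9]]

def Spec_get_largest_basins (data : List (List Int)) (out : Int) : Prop := out = get_largest_basins_alt data
instance (data : List (List Int)) (out : Int) : Decidable (Spec_get_largest_basins data out) := by unfold Spec_get_largest_basins; infer_instance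

-- ===== CLAIM (what is proved, stated in full; the proofs are below) =====
def Claim_equal_get_largest_basins : Prop := ∀ (data : List (List Int)), Dom_get_largest_basins data → Pre_get_largest_basins data → Spec_get_largest_basins data (get_largest_basins data)

-- ===== LEMMAS AND PROOFS =====

-- the two ports' cell accessors are definitionally the same function
theorem pvCellB_eq : pvCellB = pvCell := rfl

-- run is monotone in fuel once it returns
theorem pvRun_mono (data : List (List Int)) (rl cl : Int) :
    ∀ (f f' : Nat) (ts : List (Int × Int × Int)) (V : PySem.Set (Int × Int)) (k res : Int),
      f ≤ f' → pvRun data rl cl f ts V k = some res → pvRun data rl cl f' ts V k = some res := by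
  intro f
  induction f with
  | zero => intro f' ts V k res _ h; simp [pvRun] at h
  | succ f ih =>
    intro f' ts V k res hle h
    obtain ⟨f'', rfl⟩ : ∃ f'', f' = f'' + 1 := ⟨f' - 1, by omega⟩
    match ts with
    | [] => simpa [pvRun] using h
    | (r, c, d) :: ts =>
      simp only [pvRun] at h ⊢
      by_cases hc : (!(PySem.Set.contains V (r, c)) && (decide (d < pvCellB data r c) && decide (pvCellB data r c < 9))) = true <;>
        simp only [hc, if_true] at h ⊢ <;>
        exact ih f'' _ _ _ _ (by omega) h

-- one optional stack task mirrors one of A's four sequential branches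
theorem pvStep (data : List (List Int)) (rl cl : Int) (f : Nat) (d : Int)
    (IH : ∀ (r c : Int) (V : PySem.Set (Int × Int)) (s : Int) (V' : PySem.Set (Int × Int)),
      pvDfs data rl cl f r c V = some (s, V') →
      ∀ (ts : List (Int × Int × Int)) (k : Int) (fC : Nat) (res : Int),
        pvRun data rl cl fC ts V' (k + s) = some res →
        ∀ (F : Nat), 8 ^ f + fC ≤ F →
          pvRun data rl cl F (pvNbrs rl cl r c (pvCell data r c) ++ ts) (PySem.Set.add V (r, c)) (k + 1) = some res) :
    ∀ (bnd : Bool) (r' c' : Int) (V : PySem.Set (Int × Int)) (si : Int) (Vi : PySem.Set (Int × Int))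
      (ts : List (Int × Int × Int)) (k : Int) (fC : Nat) (res : Int) (F : Nat),
      (if bnd && pvCond data d r' c' V then pvDfs data rl cl f r' c' V else some (0, V)) = some (si, Vi) →
      pvRun data rl cl fC ts Vi (k + si) = some res →
      1 + 8 ^ f + fC ≤ F →
      pvRun data rl cl F ((if bnd then [(r', c', d)] else []) ++ ts) V k = some res := by
  intro bnd r' c' V si Vi ts k fC res F hif hcont hF
  have hpow : 1 ≤ 8 ^ f := Nat.one_le_pow _ _ (by omega)
  cases bnd with
  | false =>
    simp only [Bool.false_and, Bool.false_eq_true, if_false, Option.some.injEq, Prod.mk.injEq] at hif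
    obtain ⟨rfl, rfl⟩ := hif
    rw [if_neg (by simp), List.nil_append]
    exact pvRun_mono data rl cl fC F ts V k res (by omega) (by simpa using hcont)
  | true =>
    obtain ⟨F', rfl⟩ : ∃ F', F = F' + 1 := ⟨F - 1, by omega⟩
    simp only [Bool.true_and, if_true, List.singleton_append] at hif ⊢
    by_cases hc : pvCond data d r' c' V = true
    · rw [if_pos hc] at hif
      have hc' : (decide (d < pvCell data r' c') = true ∧ decide (pvCell data r' c' < 9) = true) ∧ (!(PySem.Set.contains V (r', c'))) = true := by
        simpa only [pvCond, Bool.and_eq_true] using hc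
      have hni : (r', c') ∉ V := by simpa using hc'.2
      have hguard : (!(PySem.Set.contains V (r', c')) && (decide (d < pvCellB data r' c') && decide (pvCellB data r' c' < 9))) = true := by
        simp only [pvCellB_eq]
        simp only [Bool.not_eq_true', Bool.and_eq_true]
        exact ⟨by simp [hni], hc'.1.1, hc'.1.2⟩
      simp only [pvRun, hguard, if_true]
      exact IH r' c' V si Vi hif ts k fC res hcont F' (by omega)
    · rw [if_neg hc] at hif
      simp only [Option.some.injEq, Prod.mk.injEq] at hif
      obtain ⟨rfl, rfl⟩ := hif
      have hguard : (!(PySem.Set.contains V (r', c')) && (decide (d < pvCellB data r' c') && decide (pvCellB data r' c' < 9))) = false := by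
        simp only [pvCellB_eq]
        by_contra hne
        apply hc
        have hne' : (!(PySem.Set.contains V (r', c')) && (decide (d < pvCell data r' c') && decide (pvCell data r' c' < 9))) = true := by
          cases hb : (!(PySem.Set.contains V (r', c')) && (decide (d < pvCell data r' c') && decide (pvCell data r' c' < 9))) <;> simp_all
        simp only [Bool.and_eq_true, Bool.not_eq_true'] at hne'
        have this := hne'
        have hni : (r', c') ∉ V := by
          intro hmem
          have hct := (PySem.Set.contains_iff (s := V) (x := (r', c'))).mpr hmem
          rw [this.1] at hct
          exact Bool.false_ne_true hct
        simp [pvCond, this.2.1, this.2.2, hni]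
      simp only [pvRun, hguard, Bool.false_eq_true, if_false]
      exact pvRun_mono data rl cl fC F' ts V k res (by omega) (by simpa using hcont)

-- the stack machine simulates the recursive flood fill
theorem pvSim (data : List (List Int)) (rl cl : Int) :
    ∀ (f : Nat) (r c : Int) (V : PySem.Set (Int × Int)) (s : Int) (V' : PySem.Set (Int × Int)),
      pvDfs data rl cl f r c V = some (s, V') →
      ∀ (ts : List (Int × Int × Int)) (k : Int) (fC : Nat) (res : Int),
        pvRun data rl cl fC ts V' (k + s) = some res →
        ∀ (F : Nat), 8 ^ f + fC ≤ F →
          pvRun data rl cl F (pvNbrs rl cl r c (pvCell data r c) ++ ts) (PySem.Set.add V (r, c)) (k + 1) = some res := by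
  intro f
  induction f with
  | zero => intro r c V s V' h; simp [pvDfs] at h
  | succ f IH =>
    intro r c V s V' hdfs ts k fC res hcont F hF
    have hpow : 1 ≤ 8 ^ f := Nat.one_le_pow _ _ (by omega)
    simp only [pvDfs] at hdfs
    cases h1 : (if decide (0 < r) && pvCond data (pvCell data r c) (r - 1) c (PySem.Set.add V (r, c)) then pvDfs data rl cl f (r - 1) c (PySem.Set.add V (r, c)) else some (0, PySem.Set.add V (r, c))) with
    | none => rw [h1] at hdfs; simp at hdfs
    | some p1 =>
      obtain ⟨s1, V1⟩ := p1
      rw [h1] at hdfs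
      dsimp only [] at hdfs
      cases h2 : (if decide (r < rl) && pvCond data (pvCell data r c) (r + 1) c V1 then pvDfs data rl cl f (r + 1) c V1 else some (0, V1)) with
      | none => rw [h2] at hdfs; simp at hdfs
      | some p2 =>
        obtain ⟨s2, V2⟩ := p2
        rw [h2] at hdfs
        dsimp only [] at hdfs
        cases h3 : (if decide (0 < c) && pvCond data (pvCell data r c) r (c - 1) V2 then pvDfs data rl cl f r (c - 1) V2 else some (0, V2)) with
        | none => rw [h3] at hdfs; simp at hdfs
        | some p3 =>
          obtain ⟨s3, V3⟩ := p3
          rw [h3] at hdfs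
          dsimp only [] at hdfs
          cases h4 : (if decide (c < cl) && pvCond data (pvCell data r c) r (c + 1) V3 then pvDfs data rl cl f r (c + 1) V3 else some (0, V3)) with
          | none => rw [h4] at hdfs; simp at hdfs
          | some p4 =>
            obtain ⟨s4, V4⟩ := p4
            rw [h4] at hdfs
            dsimp only [] at hdfs
            simp only [Option.some.injEq, Prod.mk.injEq] at hdfs
            obtain ⟨rfl, rfl⟩ := hdfs
            have step4 : pvRun data rl cl (1 + 8 ^ f + fC)
                ((if decide (c < cl) then [(r, c + 1, pvCell data r c)] else []) ++ ts) V3 (k + 1 + s1 + s2 + s3) = some res := by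
              refine pvStep data rl cl f (pvCell data r c) IH (decide (c < cl)) r (c + 1) V3 s4 V4 ts (k + 1 + s1 + s2 + s3) fC res _ h4 ?_ (le_refl _)
              rw [show k + 1 + s1 + s2 + s3 + s4 = k + (1 + s1 + s2 + s3 + s4) from by ring]
              exact hcont
            have step3 : pvRun data rl cl (1 + 8 ^ f + (1 + 8 ^ f + fC))
                ((if decide (0 < c) then [(r, c - 1, pvCell data r c)] else []) ++
                  ((if decide (c < cl) then [(r, c + 1, pvCell data r c)] else []) ++ ts)) V2 (k + 1 + s1 + s2) = some res :=
              pvStep data rl cl f (pvCell data r c) IH (decide (0 < c)) r (c - 1) V2 s3 V3 _ (k + 1 + s1 + s2) _ res _ h3 step4 (le_refl _)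
            have step2 : pvRun data rl cl (1 + 8 ^ f + (1 + 8 ^ f + (1 + 8 ^ f + fC)))
                ((if decide (r < rl) then [(r + 1, c, pvCell data r c)] else []) ++
                  ((if decide (0 < c) then [(r, c - 1, pvCell data r c)] else []) ++
                    ((if decide (c < cl) then [(r, c + 1, pvCell data r c)] else []) ++ ts))) V1 (k + 1 + s1) = some res :=
              pvStep data rl cl f (pvCell data r c) IH (decide (r < rl)) (r + 1) c V1 s2 V2 _ (k + 1 + s1) _ res _ h2 step3 (le_refl _)
            have step1 : pvRun data rl cl (1 + 8 ^ f + (1 + 8 ^ f + (1 + 8 ^ f + (1 + 8 ^ f + fC))))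
                ((if decide (0 < r) then [(r - 1, c, pvCell data r c)] else []) ++
                  ((if decide (r < rl) then [(r + 1, c, pvCell data r c)] else []) ++
                    ((if decide (0 < c) then [(r, c - 1, pvCell data r c)] else []) ++
                      ((if decide (c < cl) then [(r, c + 1, pvCell data r c)] else []) ++ ts)))) (PySem.Set.add V (r, c)) (k + 1) = some res :=
              pvStep data rl cl f (pvCell data r c) IH (decide (0 < r)) (r - 1) c (PySem.Set.add V (r, c)) s1 V1 _ (k + 1) _ res _ h1 step2 (le_refl _)
            have hle : 1 + 8 ^ f + (1 + 8 ^ f + (1 + 8 ^ f + (1 + 8 ^ f + fC))) ≤ F := by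
              have h8 : 8 ^ (f + 1) = 8 * 8 ^ f := pow_succ' 8 f
              omega
            have := pvRun_mono data rl cl _ F _ _ _ _ hle step1
            simpa [pvNbrs, List.append_assoc] using this

theorem pvFilterLe {α : Type} (f f' : α → Bool) (h : ∀ x, f' x = true → f x = true) :
    ∀ l : List α, (l.filter f').length ≤ (l.filter f).length := by
  intro l
  induction l with
  | nil => simp
  | cons x l ih =>
    by_cases hx : f' x = true
    · simp [hx, h x hx]; omega
    · have : f' x = false := by simpa using hx
      simp only [List.filter_cons, this]
      cases hfx : f x <;> simp <;> omega

theorem pvFilterLt {α : Type} (f f' : α → Bool) (h : ∀ x, f' x = true → f x = true)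
    (p : α) (hp : f p = true) (hp' : f' p = false) :
    ∀ l : List α, p ∈ l → (l.filter f').length < (l.filter f).length := by
  intro l
  induction l with
  | nil => simp
  | cons x l ih =>
    intro hmem
    rcases List.mem_cons.mp hmem with rfl | hmem
    · simp only [List.filter_cons, hp, hp', if_true]
      have := pvFilterLe f f' h l
      simp; omega
    · by_cases hx : f' x = true
      · simp [hx, h x hx]; exact ih hmem
      · have hx' : f' x = false := by simpa using hx
        simp only [List.filter_cons, hx']
        have := ih hmem
        cases hfx : f x <;> simp <;> omega

-- number of in-box cells not yet visited
def pvUnvis (rl cl : Int) (V : PySem.Set (Int × Int)) : Nat :=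
  (((PySem.List.pyRange 0 (rl + 1) 1).flatMap (fun r =>
      (PySem.List.pyRange 0 (cl + 1) 1).map (fun c => (r, c)))).filter
    (fun p => !(PySem.Set.contains V p))).length

theorem pvContains_add {V : PySem.Set (Int × Int)} {x y : Int × Int}
    (h : PySem.Set.contains V x = true) : PySem.Set.contains (PySem.Set.add V y) x = true := by
  have hm : x ∈ V := (PySem.Set.contains_iff (s := V) (x := x)).mp h
  have : x ∈ PySem.Set.add V y := by rw [PySem.Set.mem_add]; exact Or.inl hm
  exact (PySem.Set.contains_iff (s := PySem.Set.add V y) (x := x)).mpr this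

theorem pvContains_add_self (V : PySem.Set (Int × Int)) (y : Int × Int) :
    PySem.Set.contains (PySem.Set.add V y) y = true := by
  have : y ∈ PySem.Set.add V y := by rw [PySem.Set.mem_add]; exact Or.inr rfl
  exact (PySem.Set.contains_iff (s := PySem.Set.add V y) (x := y)).mpr this

theorem pvUnvis_mono (rl cl : Int) {V V' : PySem.Set (Int × Int)}
    (h : ∀ x, PySem.Set.contains V x = true → PySem.Set.contains V' x = true) :
    pvUnvis rl cl V' ≤ pvUnvis rl cl V := by
  apply pvFilterLe
  intro x hx
  simp only [Bool.not_eq_true'] at hx ⊢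
  cases hv : PySem.Set.contains V x
  · rfl
  · rw [h x hv] at hx; exact hx

theorem pvUnvis_add (rl cl r c : Int) (V : PySem.Set (Int × Int))
    (hr0 : 0 ≤ r) (hr1 : r ≤ rl) (hc0 : 0 ≤ c) (hc1 : c ≤ cl)
    (hnv : PySem.Set.contains V (r, c) = false) :
    pvUnvis rl cl (PySem.Set.add V (r, c)) < pvUnvis rl cl V := by
  have h1 : ∀ x, (fun p => !(PySem.Set.contains (PySem.Set.add V (r, c)) p)) x = true →
      (fun p => !(PySem.Set.contains V p)) x = true := by
    intro x hx
    simp only [Bool.not_eq_true'] at hx ⊢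
    cases hv : PySem.Set.contains V x
    · rfl
    · rw [pvContains_add hv] at hx; exact hx
  refine pvFilterLt _ _ h1 (r, c) ?_ ?_ _ ?_
  · simp only [hnv, Bool.not_false]
  · simp only [pvContains_add_self, Bool.not_true]
  · refine List.mem_flatMap.mpr ⟨r, PySem.List.mem_pyRange_one.mpr ⟨hr0, by omega⟩,
      List.mem_map.mpr ⟨c, PySem.List.mem_pyRange_one.mpr ⟨hc0, by omega⟩, rfl⟩⟩

-- A's recursion never runs out of fuel on in-box unvisited cells
theorem pvDfs_some (data : List (List Int)) (rl cl : Int) :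
    ∀ (f : Nat) (r c : Int) (V : PySem.Set (Int × Int)),
      0 ≤ r → r ≤ rl → 0 ≤ c → c ≤ cl →
      PySem.Set.contains V (r, c) = false → pvUnvis rl cl V < f →
      ∃ s V', pvDfs data rl cl f r c V = some (s, V') ∧
        (∀ x, PySem.Set.contains V x = true → PySem.Set.contains V' x = true) ∧
        pvUnvis rl cl V' < pvUnvis rl cl V := by
  intro f
  induction f with
  | zero => intro r c V _ _ _ _ _ h; omega
  | succ f IH =>
    intro r c V hr0 hr1 hc0 hc1 hnv hu
    have hbranch : ∀ (bnd : Bool) (d r' c' : Int) (W : PySem.Set (Int × Int)),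
        (bnd = true → 0 ≤ r' ∧ r' ≤ rl ∧ 0 ≤ c' ∧ c' ≤ cl) → pvUnvis rl cl W < f →
        ∃ s' W', (if bnd && pvCond data d r' c' W then pvDfs data rl cl f r' c' W else some (0, W)) = some (s', W') ∧
          (∀ x, PySem.Set.contains W x = true → PySem.Set.contains W' x = true) ∧
          pvUnvis rl cl W' ≤ pvUnvis rl cl W := by
      intro bnd d r' c' W hb hW
      by_cases hg : (bnd && pvCond data d r' c' W) = true
      · rw [if_pos hg]
        have hb' := hb (by simp_all)
        have hcW : PySem.Set.contains W (r', c') = false := by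
          have := (Bool.and_eq_true _ _).mp hg
          have hpc := this.2
          simp only [pvCond, Bool.and_eq_true, Bool.not_eq_true'] at hpc
          exact hpc.2
        obtain ⟨s', W', heq, hpres, hlt⟩ := IH r' c' W hb'.1 hb'.2.1 hb'.2.2.1 hb'.2.2.2 hcW hW
        exact ⟨s', W', heq, hpres, le_of_lt hlt⟩
      · rw [if_neg hg]
        exact ⟨0, W, rfl, fun _ h => h, le_refl _⟩
    have hV0lt : pvUnvis rl cl (PySem.Set.add V (r, c)) < pvUnvis rl cl V :=
      pvUnvis_add rl cl r c V hr0 hr1 hc0 hc1 hnv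
    have hV0 : pvUnvis rl cl (PySem.Set.add V (r, c)) < f := by omega
    obtain ⟨s1, V1, h1, p1, u1⟩ := hbranch (decide (0 < r)) (pvCell data r c) (r - 1) c (PySem.Set.add V (r, c))
      (fun hb => by simp at hb; refine ⟨by omega, by omega, hc0, hc1⟩) hV0
    obtain ⟨s2, V2, h2, p2, u2⟩ := hbranch (decide (r < rl)) (pvCell data r c) (r + 1) c V1
      (fun hb => by simp at hb; exact ⟨by omega, by omega, hc0, hc1⟩) (by omega)
    obtain ⟨s3, V3, h3, p3, u3⟩ := hbranch (decide (0 < c)) (pvCell data r c) r (c - 1) V2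
      (fun hb => by simp at hb; exact ⟨hr0, hr1, by omega, by omega⟩) (by omega)
    obtain ⟨s4, V4, h4, p4, u4⟩ := hbranch (decide (c < cl)) (pvCell data r c) r (c + 1) V3
      (fun hb => by simp at hb; exact ⟨hr0, hr1, by omega, by omega⟩) (by omega)
    refine ⟨1 + s1 + s2 + s3 + s4, V4, ?_, ?_, ?_⟩
    · simp only [pvDfs]
      rw [h1]; dsimp only []
      rw [h2]; dsimp only []
      rw [h3]; dsimp only []
      rw [h4]
    · intro x hx
      exact p4 _ (p3 _ (p2 _ (p1 _ (pvContains_add hx))))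
    · have := pvUnvis_mono rl cl p1
      omega

theorem pvUnvis_empty_le (rl cl : Int) :
    pvUnvis rl cl PySem.Set.empty ≤ (rl + 1).toNat * (cl + 1).toNat := by
  unfold pvUnvis
  refine le_trans (List.length_filter_le _ _) ?_
  rw [List.length_flatMap]
  have : ∀ x ∈ (PySem.List.pyRange 0 (rl + 1) 1).map
      (fun r => ((PySem.List.pyRange 0 (cl + 1) 1).map (fun c => (r, c))).length),
      x = (cl + 1).toNat := by
    intro x hx
    obtain ⟨r, _, rfl⟩ := List.mem_map.mp hx
    simp [PySem.List.length_pyRange_one]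
  calc ((PySem.List.pyRange 0 (rl + 1) 1).map _).sum
      ≤ ((PySem.List.pyRange 0 (rl + 1) 1).map
          (fun r => ((PySem.List.pyRange 0 (cl + 1) 1).map (fun c => (r, c))).length)).length * (cl + 1).toNat :=
        List.sum_le_card_nsmul _ _ (fun r hr => le_of_eq (this r hr))
    _ ≤ (rl + 1).toNat * (cl + 1).toNat := by
        simp [PySem.List.length_pyRange_one]

-- the two per-cell basin sizes agree
theorem pvCellValue (data : List (List Int)) (r c : Int)
    (hr0 : 0 ≤ r) (hr1 : r ≤ (data.length : Int) - 1)
    (hc0 : 0 ≤ c) (hc1 : c ≤ ((PySem.List.pyGetD data 0 ([] : List Int)).length : Int) - 1) :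
    (pvRun data ((data.length : Int) - 1) (((PySem.List.pyGetD data 0 ([] : List Int)).length : Int) - 1)
        (8 ^ ((((data.length : Int) * ((PySem.List.pyGetD data 0 ([] : List Int)).length : Int)).toNat) + 2) + 1)
        (pvNbrs ((data.length : Int) - 1) (((PySem.List.pyGetD data 0 ([] : List Int)).length : Int) - 1) r c (pvCell data r c))
        (PySem.Set.ofList [(r, c)]) 1).getD 0
      = ((pvDfs data ((data.length : Int) - 1) (((PySem.List.pyGetD data 0 ([] : List Int)).length : Int) - 1)
          ((((data.length : Int) * ((PySem.List.pyGetD data 0 ([] : List Int)).length : Int)).toNat) + 2) r c PySem.Set.empty).map Prod.fst).getD 0 := by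
  set R : Nat := data.length with hR
  set C : Nat := (PySem.List.pyGetD data 0 ([] : List Int)).length with hC
  set rl : Int := (R : Int) - 1 with hrl
  set cl : Int := (C : Int) - 1 with hcl
  set fA : Nat := (((R : Int) * (C : Int)).toNat) + 2 with hfA
  have hunvis : pvUnvis rl cl PySem.Set.empty < fA := by
    have h1 := pvUnvis_empty_le rl cl
    have e1 : rl + 1 = (R : Int) := by omega
    have e2 : cl + 1 = (C : Int) := by omega
    rw [e1, e2] at h1
    have e3 : ((R : Int) * (C : Int)).toNat = R * C := by
      rw [← Nat.cast_mul, Int.toNat_natCast]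
    simp only [Int.toNat_natCast] at h1
    omega
  have hcont0 : PySem.Set.contains PySem.Set.empty (r, c) = false := rfl
  obtain ⟨s, V', hd, _, _⟩ := pvDfs_some data rl cl fA r c PySem.Set.empty hr0 hr1 hc0 hc1 hcont0 hunvis
  have hcont : pvRun data rl cl 1 [] V' (0 + s) = some (0 + s) := by simp [pvRun]
  have hsim := pvSim data rl cl fA r c PySem.Set.empty s V' hd [] 0 1 (0 + s) hcont (8 ^ fA + 1) (le_refl _)
  rw [List.append_nil] at hsim
  have hof : PySem.Set.ofList [(r, c)] = PySem.Set.add PySem.Set.empty (r, c) := rfl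
  rw [hd, hof]
  rw [show (0 : Int) + 1 = 1 from by ring] at hsim
  rw [hsim]
  simp

-- pyGetD data 0 [] is headD on nonempty data
theorem pvHead_eq (data : List (List Int)) (h : data ≠ []) :
    PySem.List.pyGetD data 0 ([] : List Int) = data.headD [] := by
  cases data with
  | nil => exact absurd rfl h
  | cons x xs => simp [PySem.List.pyGetD_zero_cons]

-- ===== VERDICT (by name: the statement is the Claim_ definition above) =====
theorem get_largest_basins_spec : Claim_equal_get_largest_basins := by
  intro data _ hpre
  obtain ⟨hne, hrect, _⟩ := hpre
  simp only [Spec_get_largest_basins, get_largest_basins, get_largest_basins_alt]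
  have hbs : (PySem.List.enumerate data 0).foldl (fun acc p =>
      (PySem.List.enumerate p.2 0).foldl (fun acc2 q =>
        if q.2 < 9 then
          acc2 ++ [((pvDfs data ((data.length : Int) - 1) (((PySem.List.pyGetD data 0 ([] : List Int)).length : Int) - 1)
            ((((data.length : Int) * ((PySem.List.pyGetD data 0 ([] : List Int)).length : Int)).toNat) + 2) p.1 q.1 PySem.Set.empty).map Prod.fst).getD 0]
        else acc2) acc) []
    = (PySem.List.enumerate data 0).foldl (fun acc p =>
      (PySem.List.enumerate p.2 0).foldl (fun acc2 q =>
        if q.2 < 9 then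
          acc2 ++ [(pvRun data ((data.length : Int) - 1) (((PySem.List.pyGetD data 0 ([] : List Int)).length : Int) - 1)
            (8 ^ ((((data.length : Int) * ((PySem.List.pyGetD data 0 ([] : List Int)).length : Int)).toNat) + 2) + 1)
            (pvNbrs ((data.length : Int) - 1) (((PySem.List.pyGetD data 0 ([] : List Int)).length : Int) - 1) p.1 q.1 q.2)
            (PySem.Set.ofList [(p.1, q.1)]) 1).getD 0]
        else acc2) acc) [] := by
    apply PySem.List.foldl_congr_mem
    intro acc p hp
    apply PySem.List.foldl_congr_mem
    intro acc2 q hq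
    by_cases h9 : q.2 < 9
    · simp only [h9, if_true]
      rw [PySem.List.mem_enumerate_iff] at hp hq
      obtain ⟨i, hi, hpe⟩ := hp
      obtain ⟨j, hj, hqe⟩ := hq
      have hp1 : p.1 = (i : Int) := by rw [hpe]; simp
      have hp2 : p.2 = data[i] := by rw [hpe]
      have hq1 : q.1 = (j : Int) := by rw [hqe]; simp
      have hrowlen : p.2.length = (PySem.List.pyGetD data 0 ([] : List Int)).length := by
        rw [pvHead_eq data hne]
        exact hrect p.2 (hp2 ▸ List.getElem_mem hi)
      have hcell : pvCell data p.1 q.1 = q.2 := by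
        unfold pvCell
        rw [hp1, hq1, PySem.List.pyGetD_natCast, PySem.List.pyGetD_natCast]
        rw [List.getD_eq_getElem _ _ hi, ← hp2, List.getD_eq_getElem _ _ hj]
        rw [hqe]
      have hr1 : p.1 ≤ (data.length : Int) - 1 := by rw [hp1]; omega
      have hc1 : q.1 ≤ ((PySem.List.pyGetD data 0 ([] : List Int)).length : Int) - 1 := by
        rw [hq1]; rw [hrowlen] at hj; omega
      have := pvCellValue data p.1 q.1 (by rw [hp1]; omega) hr1 (by rw [hq1]; omega) hc1
      rw [hcell] at this
      rw [this]
    · simp only [h9, if_false]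
  rw [hbs]
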